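-- pv_equiv track=rewrite | github.com/ggsong0328/23-2_Algorithm | BFS & DFS/16397 - 탈출.py | B_number
-- ===== SOURCE A (Python) =====
-- def B_number(n):
--     result = n * 2
--     if result >= 100000:
--         return n
--     digits = [int(digit) for digit in str(result)]
--     for i in range(len(digits)):
--         if digits[i] != 0:
--             digits[i] -= 1
--             break
--
--     modified_result = int(''.join(map(str, digits)))
--     return modified_result
-- ===== SOURCE B (Python) =====
-- def B_number(n):
--     result = n * 2
--     if result >= 100000:
--         return n
--     if result == 0:
--         return 0
--     s = str(result)
--     return int(str(int(s[0]) - 1) + s[1:])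
-- ===== Notes on version B (the rewrite author's own statement) =====
-- stated objective: simpler
-- what changed: Instead of converting every digit to an int, scanning the list for the first nonzero digit and re-joining all digits, B decrements the leading character directly (for a positive number the first nonzero digit is the leading digit) and concatenates it with the untouched tail of the string.
import Mathlib
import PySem

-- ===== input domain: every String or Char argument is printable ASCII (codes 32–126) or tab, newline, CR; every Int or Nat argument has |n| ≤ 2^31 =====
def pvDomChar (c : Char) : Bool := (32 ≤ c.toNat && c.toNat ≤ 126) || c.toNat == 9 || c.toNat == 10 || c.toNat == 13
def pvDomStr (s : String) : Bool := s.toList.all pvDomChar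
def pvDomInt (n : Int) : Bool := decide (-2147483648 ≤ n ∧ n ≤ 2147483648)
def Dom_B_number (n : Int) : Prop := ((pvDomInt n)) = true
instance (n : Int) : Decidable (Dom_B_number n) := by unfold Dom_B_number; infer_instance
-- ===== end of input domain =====

-- B decrements the leading character of str(2n) directly instead of A's digit-list build,
-- first-nonzero scan and full re-join; same value on every admitted input (objective: simpler).

-- ===== PORT A =====
-- the 'for i in range(len(digits)): if digits[i] != 0: digits[i] -= 1; break' loop
def decFirst : List Int → List Int
  | [] => []
  | d :: ds => if d ≠ 0 then (d - 1) :: ds else d :: decFirst ds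

def B_number (n : Int) : Int :=
  let result := n * 2
  if result ≥ 100000 then n
  else
    -- int(digit) per character of str(result); for the admitted n ≥ 0 every character is a
    -- decimal digit, so ofChars? never returns none and the getD 0 default is never used
    let digits := (PySem.Int.toChars result).map (fun c => (PySem.Int.ofChars? [c]).getD 0)
    let digits' := decFirst digits
    (PySem.Int.ofChars? (digits'.flatMap PySem.Int.toChars)).getD 0

-- ===== PORT B =====
def B_number_alt (n : Int) : Int :=
  let result := n * 2
  if result ≥ 100000 then n
  else if result = 0 then 0
  else
    let s := PySem.Int.toStr result
    -- s[0]; s is nonempty, so the IndexError (none) branch never happens and getD ' ' is unused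
    let c0 := (PySem.Str.pyGet? s 0).getD ' '
    -- int(str(int(s[0]) - 1) + s[1:]); for n > 0 the int() never raises, getD 0 unused
    (PySem.Int.ofStr? (PySem.Int.toStr ((PySem.Int.ofChars? [c0]).getD 0 - 1)
        ++ PySem.Str.slice s (some 1) none)).getD 0

-- ===== PRECONDITION & SPEC =====
-- Pre_ excludes exactly the negative n: there str(n*2) starts with '-', on which A's
-- int(digit) per character raises ValueError (and B's int(s[0]) raises as well).
def Pre_B_number (n : Int) : Prop := 0 ≤ n
instance (n : Int) : Decidable (Pre_B_number n) := by unfold Pre_B_number; infer_instance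
def pvWitness_B_number : Int := 7

def Spec_B_number (n : Int) (out : Int) : Prop := out = B_number_alt n
instance (n : Int) (out : Int) : Decidable (Spec_B_number n out) := by unfold Spec_B_number; infer_instance

-- ===== CLAIM (what is proved, stated in full; the proofs are below) =====
def Claim_equal_B_number : Prop := ∀ (n : Int), Dom_B_number n → Pre_B_number n → Spec_B_number n (B_number n)

-- ===== LEMMAS AND PROOFS =====

-- single-digit facts, closed by enumeration of the ten digits
lemma pv_digitChar : ∀ e : Nat, e < 10 → (PySem.Int.ofChars? [Nat.digitChar e]).getD 0 = (e : Int) := by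
  decide

lemma toChars_digit : ∀ e : Nat, e < 10 → PySem.Int.toChars ((e : Nat) : Int) = [Nat.digitChar e] := by
  decide

lemma toChars_natCast (m : Nat) : PySem.Int.toChars ((m : Nat) : Int) = Nat.toDigits 10 m := by
  simp [PySem.Int.toChars]

-- str(m) for m > 0: a nonzero leading digit followed by digit characters
lemma core_shape (f : Nat) : ∀ (n : Nat) (L : List Char), 0 < n → n < f →
    (∀ c ∈ L, ∃ e, e < 10 ∧ c = Nat.digitChar e) →
    ∃ d rest, Nat.toDigitsCore 10 f n L = Nat.digitChar d :: rest ∧ 0 < d ∧ d < 10 ∧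
      ∀ c ∈ rest, ∃ e, e < 10 ∧ c = Nat.digitChar e := by
  induction f with
  | zero => intro n L hn hf _; omega
  | succ f ih =>
    intro n L hn hf hL
    rw [Nat.toDigitsCore]
    by_cases h10 : n / 10 = 0
    · have hlt : n < 10 := by omega
      have hmod : n % 10 = n := Nat.mod_eq_of_lt hlt
      simp only [h10, hmod, reduceIte]
      exact ⟨n, L, rfl, hn, hlt, hL⟩
    · simp only [if_neg h10]
      apply ih
      · omega
      · have := Nat.div_lt_self hn (by norm_num : 1 < 10)
        omega
      · intro c hc
        rcases List.mem_cons.mp hc with h | h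
        · exact ⟨n % 10, Nat.mod_lt _ (by norm_num), h⟩
        · exact hL c h

lemma toDigits_shape (m : Nat) (hm : 0 < m) :
    ∃ d rest, Nat.toDigits 10 m = Nat.digitChar d :: rest ∧ 0 < d ∧ d < 10 ∧
      ∀ c ∈ rest, ∃ e, e < 10 ∧ c = Nat.digitChar e := by
  exact core_shape (m + 1) m [] hm (by omega) (by intro c hc; cases hc)

-- rendering the parsed tail digits re-creates the tail characters
lemma flat_digits : ∀ (rest : List Char), (∀ c ∈ rest, ∃ e, e < 10 ∧ c = Nat.digitChar e) →
    (rest.map (fun c => (PySem.Int.ofChars? [c]).getD 0)).flatMap PySem.Int.toChars = rest := by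
  intro rest
  induction rest with
  | nil => intro _; rfl
  | cons c cs ih =>
    intro h
    rcases h c (List.mem_cons_self) with ⟨e, he, hc⟩
    have htail := ih (fun x hx => h x (List.mem_cons_of_mem _ hx))
    simp only [List.map_cons, List.flatMap_cons, htail, hc, pv_digitChar e he, toChars_digit e he,
      List.singleton_append]

-- ===== VERDICT (by name: the statement is the Claim_ definition above) =====
theorem B_number_spec : Claim_equal_B_number := by
  intro n _ hpre
  unfold Spec_B_number B_number B_number_alt
  by_cases hbig : n * 2 ≥ 100000
  · simp [hbig]
  · have hn0 : (0 : Int) ≤ n := hpre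
    simp only [if_neg hbig]
    by_cases hz : n * 2 = 0
    · have hn0 : n = 0 := by omega
      subst hn0
      decide
    · have hpos : 0 < n * 2 := by omega
      simp only [if_neg hz]
      set m : Nat := (n * 2).toNat with hmdef
      have hcast : n * 2 = (m : Int) := by omega
      have hmpos : 0 < m := by omega
      rcases toDigits_shape m hmpos with ⟨d, rest, hshape, hd0, hd10, hrest⟩
      have hchars : PySem.Int.toChars (n * 2) = Nat.digitChar d :: rest := by
        rw [hcast, toChars_natCast, hshape]
      -- A side
      have hA :
          ((PySem.Int.toChars (n * 2)).map (fun c => (PySem.Int.ofChars? [c]).getD 0)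
            |> decFirst |>.flatMap PySem.Int.toChars)
          = PySem.Int.toChars ((d : Int) - 1) ++ rest := by
        rw [hchars]
        simp only [List.map_cons, pv_digitChar d hd10]
        have hdn : ¬ d = 0 := by omega
        simp [decFirst, hdn, flat_digits rest hrest]
      -- B side characters
      have htl : (PySem.Int.toStr (n * 2)).toList = Nat.digitChar d :: rest := by
        rw [PySem.Int.toList_toStr, hchars]
      have hc0 : (PySem.Str.pyGet? (PySem.Int.toStr (n * 2)) 0).getD ' ' = Nat.digitChar d := by
        have : ((0 : Nat) : Int) = (0 : Int) := rfl
        rw [← this, PySem.Str.pyGet?_natCast, htl]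
        rfl
      have hsl : (PySem.Str.slice (PySem.Int.toStr (n * 2)) (some 1) none).toList = rest := by
        rw [PySem.Str.toList_slice, PySem.Chars.slice_eq_listSlice, htl,
          PySem.List.slice_from_one]
        rfl
      have hB :
          (PySem.Int.toStr ((PySem.Int.ofChars? [(PySem.Str.pyGet? (PySem.Int.toStr (n * 2)) 0).getD ' ']).getD 0 - 1)
            ++ PySem.Str.slice (PySem.Int.toStr (n * 2)) (some 1) none).toList
          = PySem.Int.toChars ((d : Int) - 1) ++ rest := by
        rw [String.toList_append, hc0, pv_digitChar d hd10, PySem.Int.toList_toStr, hsl]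
      rw [hA]
      rw [show PySem.Int.ofStr?
            (PySem.Int.toStr ((PySem.Int.ofChars? [(PySem.Str.pyGet? (PySem.Int.toStr (n * 2)) 0).getD ' ']).getD 0 - 1)
              ++ PySem.Str.slice (PySem.Int.toStr (n * 2)) (some 1) none)
          = PySem.Int.ofChars? (PySem.Int.toChars ((d : Int) - 1) ++ rest) from by
        rw [← hB]; simp [PySem.Int.ofStr?]]
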